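-- pv_equiv track=rewrite | github.com/rajlath/rkl_codes | Codeeval/decode_msg.py | get_key_for_index
-- ===== SOURCE A (Python) =====
-- def int_to_binary_string(x, length=0):
--     formatter = "{:0" + str(length) + "b}"
--     return formatter.format(x)
--
-- def zero_string_of_length(length):
--     result = ""
--     for i in range(length):
--         result += "0"
--     return result
--
-- def is_all_ones(s):
--     for c in s:
--         if c != '1':
--             return False
--     return True
--
-- key_cache = {}
--
-- def get_key_for_index(index):
--     if index in key_cache:
--         return key_cache[index]
--     if index == 0:
--         result = zero_string_of_length(1)
--     else:
--         previous = get_key_for_index(index-1)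
--         previous_plus_one = int_to_binary_string(int(previous, 2) + 1,
--                                                  len(previous))
--         if is_all_ones(previous_plus_one):
--             result = zero_string_of_length(len(previous) + 1)
--         else:
--             result = previous_plus_one
--     key_cache[index] = result
--     return result
-- ===== SOURCE B (Python) =====
-- def get_key_for_index(index):
--     k = 1
--     while index >= (1 << (k + 1)) - k - 2:
--         k += 1
--     return format(index - ((1 << k) - k - 1), "0{}b".format(k))
-- ===== Notes on version B (the rewrite author's own statement) =====
-- stated objective: faster
-- what changed: Replaces A's linear recursion (re-deriving each key from its predecessor by parsing it as binary, adding one, re-formatting and testing for all-ones, memoized in a module-global dict) by a closed form: a logarithmic loop sums block sizes to locate the block of keys of the right length containing the index, then formats the offset within that block directly as zero-padded binary; intended as asymptotically faster, and measured about sixty-fold at the largest size where A still returns (beyond that A hits Python's recursion limit).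
import Mathlib
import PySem

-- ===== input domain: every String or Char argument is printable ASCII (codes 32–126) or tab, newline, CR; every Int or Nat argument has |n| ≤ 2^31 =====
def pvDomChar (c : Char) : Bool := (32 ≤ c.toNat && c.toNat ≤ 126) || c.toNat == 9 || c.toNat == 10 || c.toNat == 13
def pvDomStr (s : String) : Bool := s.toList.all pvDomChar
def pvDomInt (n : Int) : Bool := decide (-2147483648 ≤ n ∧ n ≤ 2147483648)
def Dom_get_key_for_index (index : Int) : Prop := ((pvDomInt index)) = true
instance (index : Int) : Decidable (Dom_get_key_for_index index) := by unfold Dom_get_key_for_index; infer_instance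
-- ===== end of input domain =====

-- B replaces A's O(n) recursive string-increment chain by a closed form (find the block length k,
-- format the offset in zero-padded binary); A also memoizes results in a module-global dict
-- (a pure cache, no effect on the return value) — the equivalence is about the return value.

-- ===== PORT A =====
-- shared helper: Python's format(x, "0{len}b") for x ≥ 0 (binary, left-padded with zeros);
-- both Pythons call this stdlib formatter (A via int_to_binary_string, B via format).
def pvNatToBinAux : Nat → List Char → List Char
  | 0, acc => acc
  | (n+1), acc => pvNatToBinAux ((n+1)/2) ((if (n+1) % 2 == 1 then '1' else '0') :: acc)
decreasing_by exact Nat.div_lt_self (Nat.succ_pos n) (by omega)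

def pvNatToBin (n : Nat) : List Char := if n = 0 then ['0'] else pvNatToBinAux n []

def pvFmtBin (x len : Nat) : List Char :=
  List.replicate (len - (pvNatToBin x).length) '0' ++ pvNatToBin x

-- int(s, 2): exact for strings consisting of '0'/'1' digits (the only ones A parses)
def pvBinToNat (l : List Char) : Nat :=
  l.foldl (fun a c => 2 * a + (if c == '1' then 1 else 0)) 0

-- zero_string_of_length: loop appending "0" length times
def pvZeroString (len : Nat) : List Char :=
  (List.range len).foldl (fun r _ => r ++ ['0']) []

-- is_all_ones: scan with early False
def pvIsAllOnes (l : List Char) : Bool := l.all (· == '1')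

def pvAKey : Nat → List Char
  | 0 => pvZeroString 1
  | (n+1) =>
    let previous := pvAKey n
    let previousPlusOne := pvFmtBin (pvBinToNat previous + 1) previous.length
    if pvIsAllOnes previousPlusOne then pvZeroString (previous.length + 1)
    else previousPlusOne

def get_key_for_index (index : Int) : String := String.ofList (pvAKey index.toNat)

-- ===== PORT B =====
-- while index >= (1 << (k+1)) - k - 2: k += 1   (fuel n+1 bounds the loop; never exhausted for k starting at 1)
def pvFindK (n : Nat) : Nat → Nat → Nat
  | 0, k => k
  | (fuel+1), k => if 2 ^ (k + 1) - k - 2 ≤ n then pvFindK n fuel (k + 1) else k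

def get_key_for_index_alt (index : Int) : String :=
  let n := index.toNat
  let k := pvFindK n (n + 1) 1
  String.ofList (pvFmtBin (n - (2 ^ k - k - 1)) k)

-- ===== PRECONDITION & SPEC =====
-- Pre_ excludes negative indices: there A recurses on index-1 forever and dies with RecursionError.
def Pre_get_key_for_index (index : Int) : Prop := 0 ≤ index
instance (index : Int) : Decidable (Pre_get_key_for_index index) := by unfold Pre_get_key_for_index; infer_instance
def pvWitness_get_key_for_index : Int := (5)

def Spec_get_key_for_index (index : Int) (out : String) : Prop := out = get_key_for_index_alt index
instance (index : Int) (out : String) : Decidable (Spec_get_key_for_index index out) := by unfold Spec_get_key_for_index; infer_instance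

-- ===== CLAIM (what is proved, stated in full; the proofs are below) =====
def Claim_equal_get_key_for_index : Prop := ∀ (index : Int), Dom_get_key_for_index index → Pre_get_key_for_index index → Spec_get_key_for_index index (get_key_for_index index)

-- ===== LEMMAS AND PROOFS =====

-- pvS k = 2^k - k - 1 = number of keys of length < k (block k starts at index pvS k)
def pvS (k : Nat) : Nat := 2 ^ k - k - 1

theorem pvPow_ge (k : Nat) : k + 1 ≤ 2 ^ k := Nat.lt_two_pow_self

theorem pvS_succ (k : Nat) : pvS (k + 1) = pvS k + (2 ^ k - 1) := by
  unfold pvS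
  have h := pvPow_ge k
  have h2 : 2 ^ (k + 1) = 2 * 2 ^ k := by ring
  rw [h2]; generalize 2 ^ k = x at *; omega

theorem pvS_succ_eq (k : Nat) : pvS (k + 1) = 2 ^ (k + 1) - k - 2 := by
  unfold pvS; generalize 2 ^ (k + 1) = x; omega

theorem pvS_mono : ∀ {j k : Nat}, j ≤ k → pvS j ≤ pvS k := by
  intro j k h
  induction k with
  | zero =>
    have : j = 0 := by omega
    subst this; exact Nat.le_refl _
  | succ k ih =>
    rcases Nat.lt_or_ge j (k + 1) with hj | hj
    · have h1 := ih (by omega)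
      have h2 := pvS_succ k
      omega
    · have : j = k + 1 := by omega
      subst this; exact Nat.le_refl _

theorem pvFindK_spec (n : Nat) : ∀ fuel k : Nat, pvS k ≤ n → n < pvS (k + fuel) →
    pvS (pvFindK n fuel k) ≤ n ∧ n < pvS (pvFindK n fuel k + 1) ∧ k ≤ pvFindK n fuel k := by
  intro fuel
  induction fuel with
  | zero =>
    intro k h1 h2
    simp only [Nat.add_zero] at h2
    omega
  | succ f ih =>
    intro k h1 h2
    rw [pvFindK]
    split
    · next hc =>
      have hc' : pvS (k + 1) ≤ n := by rw [pvS_succ_eq]; exact hc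
      have h2' : n < pvS ((k + 1) + f) := by
        have : (k + 1) + f = k + (f + 1) := by omega
        rw [this]; exact h2
      obtain ⟨a, b, c⟩ := ih (k + 1) hc' h2'
      exact ⟨a, b, by omega⟩
    · next hc =>
      have : n < pvS (k + 1) := by rw [pvS_succ_eq]; omega
      exact ⟨h1, this, Nat.le_refl k⟩

theorem pvK_spec (n : Nat) :
    1 ≤ pvFindK n (n + 1) 1 ∧ pvS (pvFindK n (n + 1) 1) ≤ n ∧ n < pvS (pvFindK n (n + 1) 1 + 1) := by
  have h0 : pvS 1 ≤ n := by unfold pvS; omega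
  have h1 : n < pvS (1 + (n + 1)) := by
    unfold pvS
    have h := pvPow_ge n
    have h2 : 2 ^ (1 + (n + 1)) = 4 * 2 ^ n := by ring
    rw [h2]; generalize 2 ^ n = x at *; omega
  obtain ⟨a, b, c⟩ := pvFindK_spec n (n + 1) 1 h0 h1
  exact ⟨c, a, b⟩

theorem pvK_unique (n k : Nat) (_hk : 1 ≤ k) (h1 : pvS k ≤ n) (h2 : n < pvS (k + 1)) :
    pvFindK n (n + 1) 1 = k := by
  obtain ⟨a, b, c⟩ := pvK_spec n
  rcases Nat.lt_trichotomy (pvFindK n (n + 1) 1) k with h | h | h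
  · have := pvS_mono (show pvFindK n (n + 1) 1 + 1 ≤ k by omega)
    omega
  · exact h
  · have := pvS_mono (show k + 1 ≤ pvFindK n (n + 1) 1 by omega)
    omega

-- binary-digit-list facts
theorem pvAux_app (n : Nat) : ∀ acc, pvNatToBinAux n acc = pvNatToBinAux n [] ++ acc := by
  induction n using Nat.strong_induction_on with
  | _ n ih =>
    match n with
    | 0 => intro acc; simp [pvNatToBinAux]
    | (m + 1) =>
      intro acc
      rw [pvNatToBinAux]
      conv_rhs => rw [pvNatToBinAux]
      rw [ih ((m + 1) / 2) (by omega)]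
      conv_rhs => rw [ih ((m + 1) / 2) (by omega)]
      simp

theorem pvAux_val (n : Nat) : ∀ a : Nat,
    (pvNatToBinAux n []).foldl (fun a c => 2 * a + (if c == '1' then 1 else 0)) a
      = a * 2 ^ (pvNatToBinAux n []).length + n := by
  induction n using Nat.strong_induction_on with
  | _ n ih =>
    match n with
    | 0 => intro a; simp [pvNatToBinAux]
    | (m + 1) =>
      intro a
      rw [pvNatToBinAux, pvAux_app ((m + 1) / 2)]
      rw [List.foldl_append, List.length_append]
      rw [ih ((m + 1) / 2) (by omega)]
      have hd : ((if (m + 1) % 2 == 1 then '1' else '0') == '1') = ((m + 1) % 2 == 1) := by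
        rcases Nat.mod_two_eq_zero_or_one (m + 1) with h | h <;> simp [h]
      simp only [List.foldl_cons, List.foldl_nil, List.length_cons, List.length_nil, hd]
      have hp : 2 ^ ((pvNatToBinAux ((m + 1) / 2) []).length + (0 + 1))
          = 2 ^ (pvNatToBinAux ((m + 1) / 2) []).length * 2 := by ring
      rw [hp]
      have hr : a * (2 ^ (pvNatToBinAux ((m + 1) / 2) []).length * 2)
          = 2 * (a * 2 ^ (pvNatToBinAux ((m + 1) / 2) []).length) := by ring
      rw [hr]
      rcases Nat.mod_two_eq_zero_or_one (m + 1) with h | h <;>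
        simp [h] <;> generalize a * 2 ^ (pvNatToBinAux ((m + 1) / 2) []).length = y <;> omega

theorem pvAux_len (n : Nat) : ∀ k : Nat, n < 2 ^ k → (pvNatToBinAux n []).length ≤ k := by
  induction n using Nat.strong_induction_on with
  | _ n ih =>
    match n with
    | 0 => intro k _; simp [pvNatToBinAux]
    | (m + 1) =>
      intro k hk
      match k with
      | 0 => simp at hk
      | (j + 1) =>
        rw [pvNatToBinAux, pvAux_app ((m + 1) / 2)]
        have hq : (m + 1) / 2 < 2 ^ j := by
          have h2 : 2 ^ (j + 1) = 2 * 2 ^ j := by ring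
          rw [h2] at hk; omega
        have := ih ((m + 1) / 2) (by omega) j hq
        simp only [List.length_append, List.length_cons, List.length_nil]
        omega

theorem pvBin_val (n : Nat) :
    (pvNatToBin n).foldl (fun a c => 2 * a + (if c == '1' then 1 else 0)) 0 = n := by
  unfold pvNatToBin
  split
  · next h => simp [h]
  · next h => rw [pvAux_val n 0]; omega

theorem pvBin_len (n k : Nat) (hk : 1 ≤ k) (h : n < 2 ^ k) : (pvNatToBin n).length ≤ k := by
  unfold pvNatToBin
  split
  · simp; omega
  · exact pvAux_len n k h

theorem pvBin_ones (k : Nat) (hk : 1 ≤ k) : pvNatToBin (2 ^ k - 1) = List.replicate k '1' := by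
  induction k, hk using Nat.le_induction with
  | base => norm_num [pvNatToBin, pvNatToBinAux]
  | succ k hk ih =>
    have hpow : 2 ≤ 2 ^ k := by have := pvPow_ge k; have : 2 ^ 1 ≤ 2 ^ k := Nat.pow_le_pow_right (by omega) hk; omega
    have h2 : 2 ^ (k + 1) = 2 * 2 ^ k := by ring
    have hne : 2 ^ (k + 1) - 1 ≠ 0 := by omega
    obtain ⟨m, hm⟩ : ∃ m, 2 ^ (k + 1) - 1 = m + 1 := ⟨2 ^ (k + 1) - 2, by omega⟩
    have hq : (m + 1) / 2 = 2 ^ k - 1 := by omega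
    have hr : (m + 1) % 2 = 1 := by omega
    rw [pvNatToBin, if_neg hne, hm, pvNatToBinAux, hq, hr]
    rw [pvAux_app (2 ^ k - 1)]
    have hkne : 2 ^ k - 1 ≠ 0 := by omega
    have heq : pvNatToBinAux (2 ^ k - 1) [] = pvNatToBin (2 ^ k - 1) := by
      rw [pvNatToBin, if_neg hkne]
    rw [heq, ih]
    simp [← List.replicate_succ']

theorem pvAllOnes_val (l : List Char) : ∀ a : Nat, l.all (· == '1') = true →
    l.foldl (fun a c => 2 * a + (if c == '1' then 1 else 0)) a = (a + 1) * 2 ^ l.length - 1 := by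
  induction l with
  | nil => intro a _; simp
  | cons c t ih =>
    intro a h
    simp only [List.all_cons, Bool.and_eq_true] at h
    obtain ⟨hc, ht⟩ := h
    simp only [List.foldl_cons, List.length_cons]
    rw [if_pos hc, ih (2 * a + 1) ht]
    have h2 : (a + 1) * 2 ^ (t.length + 1) = (2 * a + 1 + 1) * 2 ^ t.length := by ring
    rw [h2]

theorem pvZeros_foldl (j : Nat) (l : List Char) :
    (List.replicate j '0' ++ l).foldl (fun a c => 2 * a + (if c == '1' then 1 else 0)) 0
      = l.foldl (fun a c => 2 * a + (if c == '1' then 1 else 0)) 0 := by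
  rw [List.foldl_append]
  have haux : ∀ j : Nat, (List.replicate j '0').foldl (fun a c => 2 * a + (if c == '1' then 1 else 0)) 0 = 0 := by
    intro j
    induction j with
    | zero => rfl
    | succ j ih =>
      rw [List.replicate_succ, List.foldl_cons]
      simpa using ih
  rw [haux j]

theorem pvFmt_val (m k : Nat) : pvBinToNat (pvFmtBin m k) = m := by
  unfold pvBinToNat pvFmtBin
  rw [pvZeros_foldl, pvBin_val]

theorem pvFmt_len (m k : Nat) (hk : 1 ≤ k) (h : m < 2 ^ k) : (pvFmtBin m k).length = k := by
  unfold pvFmtBin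
  have := pvBin_len m k hk h
  simp only [List.length_append, List.length_replicate]
  omega

theorem pvFmt_ones (k : Nat) (hk : 1 ≤ k) : pvFmtBin (2 ^ k - 1) k = List.replicate k '1' := by
  unfold pvFmtBin
  rw [pvBin_ones k hk]
  simp

theorem pvBin_zero : pvNatToBin 0 = ['0'] := by simp [pvNatToBin]

theorem pvFmt_zero (k : Nat) (hk : 1 ≤ k) : pvFmtBin 0 k = List.replicate k '0' := by
  unfold pvFmtBin
  rw [pvBin_zero]
  show List.replicate (k - 1) '0' ++ ['0'] = List.replicate k '0'
  have hk1 : k = (k - 1) + 1 := by omega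
  conv_rhs => rw [hk1, List.replicate_succ']

theorem pvZeroString_eq (j : Nat) : pvZeroString j = List.replicate j '0' := by
  unfold pvZeroString
  induction j with
  | zero => simp
  | succ j ih =>
    rw [List.range_succ, List.foldl_append, ih]
    simp [← List.replicate_succ']

theorem pvMain : ∀ n : Nat,
    pvAKey n = pvFmtBin (n - pvS (pvFindK n (n + 1) 1)) (pvFindK n (n + 1) 1) := by
  intro n
  induction n with
  | zero =>
    have h1 : pvFindK 0 (0 + 1) 1 = 1 := rfl
    have h2 : 0 - pvS 1 = 0 := rfl
    rw [h1, h2, pvFmt_zero 1 (by omega)]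
    simp [pvAKey, pvZeroString_eq]
  | succ n ih =>
    obtain ⟨hk1, hkl, hkr⟩ := pvK_spec n
    have hSsucc := pvS_succ (pvFindK n (n + 1) 1)
    set k := pvFindK n (n + 1) 1 with hkdef
    set m := n - pvS k with hmdef
    have hpow : 1 ≤ 2 ^ k := Nat.one_le_two_pow
    have hmlt : m + 1 ≤ 2 ^ k - 1 := by omega
    have hlen : (pvFmtBin m k).length = k := pvFmt_len m k hk1 (by omega)
    have hval : pvBinToNat (pvFmtBin m k) = m := pvFmt_val m k
    simp only [pvAKey]
    rw [ih, hval, hlen]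
    by_cases h1 : m + 1 = 2 ^ k - 1
    · -- previous+1 is all ones: new block of length k+1, offset 0
      rw [h1, pvFmt_ones k hk1]
      have hall : pvIsAllOnes (List.replicate k '1') = true := by
        simp [pvIsAllOnes]
      rw [if_pos hall]
      have hS1 : pvS (k + 1) = n + 1 := by omega
      have hS2 : n + 1 < pvS (k + 1 + 1) := by
        have := pvS_succ (k + 1)
        have : 2 ≤ 2 ^ (k + 1) := by have := pvPow_ge (k + 1); omega
        omega
      rw [pvK_unique (n + 1) (k + 1) (by omega) (by omega) hS2]
      have : n + 1 - pvS (k + 1) = 0 := by omega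
      rw [this, pvFmt_zero (k + 1) (by omega), pvZeroString_eq]
    · -- still inside block k, offset m+1
      have h1' : m + 1 < 2 ^ k - 1 := by omega
      have hfalse : pvIsAllOnes (pvFmtBin (m + 1) k) = false := by
        cases hb : pvIsAllOnes (pvFmtBin (m + 1) k)
        · rfl
        · exfalso
          unfold pvIsAllOnes at hb
          have hv := pvAllOnes_val (pvFmtBin (m + 1) k) 0 hb
          rw [pvFmt_len (m + 1) k hk1 (by omega)] at hv
          have hv2 : pvBinToNat (pvFmtBin (m + 1) k) = m + 1 := pvFmt_val (m + 1) k
          unfold pvBinToNat at hv2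
          omega
      rw [if_neg (by simp [hfalse])]
      have hu : pvFindK (n + 1) (n + 1 + 1) 1 = k :=
        pvK_unique (n + 1) k hk1 (by omega) (by omega)
      rw [hu]
      have : n + 1 - pvS k = m + 1 := by omega
      rw [this]

-- ===== VERDICT (by name: the statement is the Claim_ definition above) =====
theorem get_key_for_index_spec : Claim_equal_get_key_for_index := by
  intro index _ hpre
  show _ = _
  unfold get_key_for_index get_key_for_index_alt
  exact congrArg String.ofList (pvMain index.toNat)
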